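-- pv_equiv track=rewrite | github.com/ericmerle3789/Collatz-Junction-Theorem | scripts/exploration/sp10_level13_pieces.py | compute_N3_moment
-- ===== SOURCE A (Python) =====
-- from collections import Counter
--
-- def compute_N3_moment(p, m, elements):
--     """N₃(H) = |{(a₁,...,a₆) ∈ H⁶ : a₁+a₂+a₃ ≡ a₄+a₅+a₆ (mod p)}|."""
--     # Compute 3-fold sums
--     sums3 = Counter()
--     for a in elements:
--         for b in elements:
--             for c in elements:
--                 s = (a + b + c) % p
--                 sums3[s] += 1
--     N3 = sum(v * v for v in sums3.values())
--     return N3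
-- ===== SOURCE B (Python) =====
-- from collections import Counter
--
-- def compute_N3_moment(p, m, elements):
--     """N₃(H) = |{(a₁,...,a₆) ∈ H⁶ : a₁+a₂+a₃ ≡ a₄+a₅+a₆ (mod p)}|."""
--     # Residue histogram, then 3-fold cyclic convolution over Z_p:
--     # O(n + k^2) for k distinct residues instead of O(n^3).
--     hist = Counter(a % p for a in elements)
--     conv2 = Counter()
--     for r1, c1 in hist.items():
--         for r2, c2 in hist.items():
--             conv2[(r1 + r2) % p] += c1 * c2
--     conv3 = Counter()
--     for t, c in conv2.items():
--         for r, c1 in hist.items():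
--             conv3[(t + r) % p] += c * c1
--     return sum(v * v for v in conv3.values())
-- ===== Notes on version B (the rewrite author's own statement) =====
-- stated objective: faster
-- what changed: Replaces the O(n^3) triple loop over elements by a residue histogram followed by a 3-fold cyclic convolution over the distinct residues (pairwise convolution done twice), so the cost in the list length drops to one pass.
import Mathlib
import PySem

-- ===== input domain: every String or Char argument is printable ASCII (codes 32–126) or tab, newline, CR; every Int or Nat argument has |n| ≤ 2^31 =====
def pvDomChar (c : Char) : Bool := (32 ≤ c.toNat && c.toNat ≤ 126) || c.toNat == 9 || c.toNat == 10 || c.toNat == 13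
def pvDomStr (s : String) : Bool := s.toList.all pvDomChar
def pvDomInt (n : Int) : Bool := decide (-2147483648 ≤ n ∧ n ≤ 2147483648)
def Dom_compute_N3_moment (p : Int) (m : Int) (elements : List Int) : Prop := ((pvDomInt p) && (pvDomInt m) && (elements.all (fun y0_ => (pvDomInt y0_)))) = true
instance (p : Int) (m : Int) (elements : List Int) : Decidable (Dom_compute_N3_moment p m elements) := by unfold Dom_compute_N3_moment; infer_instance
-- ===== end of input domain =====

-- B replaces A's O(n^3) triple loop by a residue histogram and a 3-fold cyclic
-- convolution over the distinct residues (objective: faster).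

-- ===== PORT A =====
def compute_N3_moment (p : Int) (m : Int) (elements : List Int) : Int :=
  let sums3 := elements.foldl (fun d a =>
    elements.foldl (fun d b =>
      elements.foldl (fun d c =>
        d.modify (PySem.Int.mod (a + b + c) p) 0 (fun v => v + 1)) d) d) PySem.Dict.empty
  (sums3.values.map (fun v => v * v)).sum

-- ===== PORT B =====
def compute_N3_moment_alt (p : Int) (m : Int) (elements : List Int) : Int :=
  let hist := PySem.Dict.counter (elements.map (fun a => PySem.Int.mod a p))
  let conv2 := hist.items.foldl (fun d x =>
    hist.items.foldl (fun d y =>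
      d.modify (PySem.Int.mod (x.1 + y.1) p) 0 (fun v => v + x.2 * y.2)) d) PySem.Dict.empty
  let conv3 := conv2.items.foldl (fun d t =>
    hist.items.foldl (fun d r =>
      d.modify (PySem.Int.mod (t.1 + r.1) p) 0 (fun v => v + t.2 * r.2)) d) PySem.Dict.empty
  (conv3.values.map (fun v => v * v)).sum

-- ===== PRECONDITION & SPEC =====
-- Pre_ excludes exactly the inputs where Python raises ZeroDivisionError:
-- p = 0 with a nonempty elements list (the '%' is only reached then).
def Pre_compute_N3_moment (p : Int) (m : Int) (elements : List Int) : Prop :=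
  p ≠ 0 ∨ elements = []
instance (p : Int) (m : Int) (elements : List Int) : Decidable (Pre_compute_N3_moment p m elements) := by
  unfold Pre_compute_N3_moment; infer_instance

def pvWitness_compute_N3_moment : Int × Int × List Int := (7, 0, [1, 2, 3, 9])

def Spec_compute_N3_moment (p : Int) (m : Int) (elements : List Int) (out : Int) : Prop := out = compute_N3_moment_alt p m elements
instance (p : Int) (m : Int) (elements : List Int) (out : Int) : Decidable (Spec_compute_N3_moment p m elements out) := by unfold Spec_compute_N3_moment; infer_instance

-- ===== CLAIM (what is proved, stated in full; the proofs are below) =====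
def Claim_equal_compute_N3_moment : Prop := ∀ (p : Int) (m : Int) (elements : List Int), Dom_compute_N3_moment p m elements → Pre_compute_N3_moment p m elements → Spec_compute_N3_moment p m elements (compute_N3_moment p m elements)

-- ===== LEMMAS AND PROOFS =====

-- A weighted counting fold (both ports' dict-building loops have this shape).
def wf {α : Type} (key : α → Int) (w : α → Int) (d : PySem.Dict Int Int) (l : List α) : PySem.Dict Int Int :=
  l.foldl (fun d x => d.modify (key x) 0 (fun v => v + w x)) d

theorem wf_getD {α : Type} (key : α → Int) (w : α → Int) (l : List α) (d : PySem.Dict Int Int) (v : Int) :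
    (wf key w d l).getD v 0 = d.getD v 0 + (l.map (fun x => if key x = v then w x else 0)).sum := by
  induction l generalizing d with
  | nil => simp [wf]
  | cons x xs ih =>
    simp only [wf, List.foldl_cons] at *
    rw [ih, PySem.Dict.getD_modify]
    by_cases h : v = key x <;> simp [h, eq_comm] <;> ring

theorem wf_keys {α : Type} (key : α → Int) (w : α → Int) (l : List α) :
    (wf key w PySem.Dict.empty l).keys = PySem.Set.ofList (l.map key) := by
  rw [wf, PySem.Dict.keys_foldl_modify_key l key 0 (fun _ x => (fun v => v + w x)) PySem.Dict.empty]
  simp [PySem.Set.update_nil_left]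

-- regrouping: a sum over the distinct keys weighted by multiplicity is the plain sum
theorem regroup (S L : List Int) (hS : S.Nodup) (hmem : ∀ k, k ∈ S ↔ k ∈ L) (F : Int → Int) :
    (S.map (fun k => (L.count k : Int) * F k)).sum = (L.map F).sum := by
  have hfin : S.toFinset = L.toFinset := by
    ext a; simp [List.mem_toFinset, hmem a]
  rw [← List.sum_toFinset _ hS, Finset.sum_list_map_count, hfin]
  refine Finset.sum_congr rfl fun m _ => ?_
  simp [nsmul_eq_mul]

-- 0/1 sums count
theorem sum_ite_count (l : List Int) (t : Int) :
    (l.map (fun x => if x = t then (1 : Int) else 0)).sum = (l.count t : Int) := by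
  induction l with
  | nil => simp
  | cons x xs ih =>
    by_cases h : x = t <;> simp [h, ih, List.count_cons] <;> push_cast <;> ring

-- Python-mod congruence: (x % p + y) % p = (x + y) % p, for any p ≠ 0
theorem mod_add_left_pos (p x y : Int) (hp : 0 < p) :
    PySem.Int.mod (PySem.Int.mod x p + y) p = PySem.Int.mod (x + y) p := by
  rw [PySem.Int.mod_eq_emod_of_pos hp, PySem.Int.mod_eq_emod_of_pos hp,
      PySem.Int.mod_eq_emod_of_pos hp, Int.emod_add_emod]

theorem mod_add_left (p x y : Int) (hp : p ≠ 0) :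
    PySem.Int.mod (PySem.Int.mod x p + y) p = PySem.Int.mod (x + y) p := by
  rcases lt_trichotomy p 0 with h | h | h
  · have h' : 0 < -p := by omega
    have e : ∀ z : Int, PySem.Int.mod z p = -PySem.Int.mod (-z) (-p) := by
      intro z
      have := PySem.Int.mod_neg_neg (-z) (-p)
      rw [neg_neg, neg_neg] at this
      omega
    rw [e (PySem.Int.mod x p + y), e x, e (x + y)]
    rw [show -(-PySem.Int.mod (-x) (-p) + y) = PySem.Int.mod (-x) (-p) + -y by ring]
    rw [mod_add_left_pos (-p) (-x) (-y) h']
    rw [show -x + -y = -(x + y) by ring]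
  · omega
  · exact mod_add_left_pos p x y h

theorem mod_add_right (p x y : Int) (hp : p ≠ 0) :
    PySem.Int.mod (x + PySem.Int.mod y p) p = PySem.Int.mod (x + y) p := by
  rw [add_comm x, mod_add_left p y x hp, add_comm y x]

-- key collapse for the three-stage convolution
theorem mod_collapse (p a b c : Int) (hp : p ≠ 0) :
    PySem.Int.mod (PySem.Int.mod (PySem.Int.mod a p + PySem.Int.mod b p) p + PySem.Int.mod c p) p
      = PySem.Int.mod (a + b + c) p := by
  rw [mod_add_right _ _ c hp, mod_add_left _ _ c hp]
  rw [show PySem.Int.mod a p + PySem.Int.mod b p + c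
        = PySem.Int.mod a p + (PySem.Int.mod b p + c) from by ring]
  rw [mod_add_left p a _ hp]
  rw [show a + (PySem.Int.mod b p + c) = PySem.Int.mod b p + (a + c) from by ring]
  rw [mod_add_left p b _ hp]
  rw [show b + (a + c) = a + b + c from by ring]

-- ---- structural layer ----

-- the list of 3-fold sums in A's traversal order
def TL (elements : List Int) : List Int :=
  elements.flatMap (fun a => elements.flatMap (fun b => elements.map (fun c => a + b + c)))

def TLm (p : Int) (elements : List Int) : List Int :=
  (TL elements).map (fun x => PySem.Int.mod x p)

-- B's residue lists
def L1 (p : Int) (elements : List Int) : List Int :=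
  elements.map (fun a => PySem.Int.mod a p)

def L2 (p : Int) (elements : List Int) : List Int :=
  (L1 p elements).flatMap (fun u => (L1 p elements).map (fun v => PySem.Int.mod (u + v) p))

def L3 (p : Int) (elements : List Int) : List Int :=
  (L2 p elements).flatMap (fun t => (L1 p elements).map (fun z => PySem.Int.mod (t + z) p))

theorem sum_flatMap_eq {α : Type} (l : List α) (g : α → List Int) :
    (l.flatMap g).sum = (l.map (fun a => (g a).sum)).sum := by
  induction l with
  | nil => simp
  | cons x xs ih => simp [ih]

-- a sum of f(k)·multiplicity over the distinct keys equals the plain sum over the list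
theorem rep_sum (S L : List Int) (hS : S.Nodup) (hmem : ∀ k, k ∈ S ↔ k ∈ L) (f : Int → Int) :
    (S.map (fun k => f k * (L.count k : Int))).sum = (L.map f).sum := by
  have h := regroup S L hS hmem f
  rw [← h]
  refine congrArg _ (List.map_congr_left fun k _ => ?_)
  ring

-- value of a pairwise convolution fold at a key: a multiplicity count
theorem pair_getD (A B : List (Int × Int)) (SA SB LA LB : List Int) (key : Int → Int → Int)
    (hA : A = SA.map (fun k => (k, (LA.count k : Int)))) (hSA : SA.Nodup) (hmemA : ∀ k, k ∈ SA ↔ k ∈ LA)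
    (hB : B = SB.map (fun k => (k, (LB.count k : Int)))) (hSB : SB.Nodup) (hmemB : ∀ k, k ∈ SB ↔ k ∈ LB)
    (s : Int) :
    (wf (fun q : (Int × Int) × (Int × Int) => key q.1.1 q.2.1) (fun q => q.1.2 * q.2.2)
        PySem.Dict.empty (A.flatMap (fun x => B.map (fun y => (x, y))))).getD s 0
      = ((LA.flatMap (fun u => LB.map (fun v => key u v))).count s : Int) := by
  rw [wf_getD]
  rw [PySem.Dict.getD_empty, zero_add]
  rw [List.map_flatMap, sum_flatMap_eq]
  have hrhs : ((LA.flatMap (fun u => LB.map (fun v => key u v))).count s : Int)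
      = (LA.map (fun u => (LB.map (fun v => if key u v = s then (1 : Int) else 0)).sum)).sum := by
    rw [← sum_ite_count, List.map_flatMap, sum_flatMap_eq]
    refine congrArg _ (List.map_congr_left fun u _ => ?_)
    rw [List.map_map]
    rfl
  rw [hrhs]
  have hinner : ∀ x : Int × Int,
      ((B.map (fun y => (x, y))).map
        (fun q : (Int × Int) × (Int × Int) => if key q.1.1 q.2.1 = s then q.1.2 * q.2.2 else 0)).sum
      = x.2 * (LB.map (fun v => if key x.1 v = s then (1 : Int) else 0)).sum := by
    intro x
    rw [List.map_map, hB, List.map_map]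
    calc ((SB.map ((fun q : (Int × Int) × (Int × Int) =>
            if key q.1.1 q.2.1 = s then q.1.2 * q.2.2 else 0) ∘ (fun y => (x, y)) ∘
            (fun k => (k, (LB.count k : Int))))).sum)
        = (SB.map (fun k => (if key x.1 k = s then x.2 else 0) * (LB.count k : Int))).sum := by
          refine congrArg _ (List.map_congr_left fun k _ => ?_)
          simp only [Function.comp]
          by_cases h : key x.1 k = s <;> simp [h]
      _ = (LB.map (fun k => if key x.1 k = s then x.2 else 0)).sum :=
          rep_sum SB LB hSB hmemB _
      _ = x.2 * (LB.map (fun v => if key x.1 v = s then (1 : Int) else 0)).sum := by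
          rw [← List.sum_map_mul_left]
          refine congrArg _ (List.map_congr_left fun v _ => ?_)
          by_cases h : key x.1 v = s <;> simp [h]
  rw [List.map_congr_left (fun x _ => hinner x)]
  rw [hA, List.map_map]
  calc ((SA.map ((fun x : Int × Int =>
          x.2 * (LB.map (fun v => if key x.1 v = s then (1 : Int) else 0)).sum) ∘
          (fun k => (k, (LA.count k : Int))))).sum)
      = (SA.map (fun k => (LB.map (fun v => if key k v = s then (1 : Int) else 0)).sum
            * (LA.count k : Int))).sum := by
        refine congrArg _ (List.map_congr_left fun k _ => ?_)
        simp only [Function.comp]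
        ring
    _ = (LA.map (fun u => (LB.map (fun v => if key u v = s then (1 : Int) else 0)).sum)).sum :=
        rep_sum SA LA hSA hmemA _

-- key membership of a pairwise convolution fold
theorem pair_keys_mem (A B : List (Int × Int)) (SA SB LA LB : List Int) (key : Int → Int → Int)
    (hA : A = SA.map (fun k => (k, (LA.count k : Int)))) (hmemA : ∀ k, k ∈ SA ↔ k ∈ LA)
    (hB : B = SB.map (fun k => (k, (LB.count k : Int)))) (hmemB : ∀ k, k ∈ SB ↔ k ∈ LB)
    (k : Int) :
    (k ∈ (wf (fun q : (Int × Int) × (Int × Int) => key q.1.1 q.2.1) (fun q => q.1.2 * q.2.2)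
        PySem.Dict.empty (A.flatMap (fun x => B.map (fun y => (x, y))))).keys)
      ↔ k ∈ LA.flatMap (fun u => LB.map (fun v => key u v)) := by
  rw [wf_keys, PySem.Set.mem_ofList]
  simp only [hA, hB, List.map_flatMap, List.map_map, List.mem_flatMap, List.mem_map,
    List.flatMap_map]
  constructor
  · rintro ⟨u, hu, ⟨v, hv, rfl⟩⟩
    exact ⟨u, (hmemA u).mp hu, v, (hmemB v).mp hv, rfl⟩
  · rintro ⟨u, hu, v, hv, rfl⟩
    exact ⟨u, (hmemA u).mpr hu, ⟨v, (hmemB v).mpr hv, rfl⟩⟩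

-- assembling a dict's squared-values sum into canonical form
theorem result_sum (d : PySem.Dict Int Int) (L : List Int) (hn : d.keys.Nodup)
    (hmem : ∀ k, k ∈ d.keys ↔ k ∈ L) (hval : ∀ k, d.getD k 0 = (L.count k : Int)) :
    (d.values.map (fun v => v * v)).sum
      = ((PySem.Set.ofList L).map (fun k => (L.count k : Int) * (L.count k : Int))).sum := by
  rw [PySem.Dict.values_eq_map_keys d hn 0, List.map_map]
  have hperm : d.keys.Perm (PySem.Set.ofList L) :=
    (List.perm_ext_iff_of_nodup hn (PySem.Set.nodup_ofList L)).mpr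
      (by intro a; rw [PySem.Set.mem_ofList]; exact hmem a)
  have h1 : d.keys.map ((fun v : Int => v * v) ∘ fun k => d.getD k 0)
      = d.keys.map (fun k => (L.count k : Int) * (L.count k : Int)) :=
    List.map_congr_left fun k _ => by simp [Function.comp, hval k]
  rw [h1]
  exact (hperm.map _).sum_eq

-- A's result in canonical form
theorem A_eq (p : Int) (m : Int) (elements : List Int) :
    compute_N3_moment p m elements
      = ((PySem.Set.ofList (TLm p elements)).map
          (fun k => ((TLm p elements).count k : Int) * ((TLm p elements).count k : Int))).sum := by
  have hd : elements.foldl (fun d a =>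
      elements.foldl (fun d b =>
        elements.foldl (fun d c =>
          d.modify (PySem.Int.mod (a + b + c) p) 0 (fun v => v + 1)) d) d) PySem.Dict.empty
      = wf (fun x => PySem.Int.mod x p) (fun _ => 1) PySem.Dict.empty (TL elements) := by
    simp [wf, TL, List.foldl_flatMap, List.foldl_map]
  show ((elements.foldl _ PySem.Dict.empty).values.map (fun v => v * v)).sum = _
  rw [hd]
  refine result_sum _ _ ?_ ?_ ?_
  · rw [wf_keys]; exact PySem.Set.nodup_ofList _
  · intro k; rw [wf_keys, PySem.Set.mem_ofList, TLm]
  · intro k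
    rw [wf_getD, PySem.Dict.getD_empty, zero_add, TLm, ← sum_ite_count, List.map_map]
    rfl

-- B's result in canonical form
theorem B_eq (p : Int) (m : Int) (elements : List Int) :
    compute_N3_moment_alt p m elements
      = ((PySem.Set.ofList (L3 p elements)).map
          (fun k => ((L3 p elements).count k : Int) * ((L3 p elements).count k : Int))).sum := by
  simp only [compute_N3_moment_alt]
  have hhist : (PySem.Dict.counter (elements.map (fun a => PySem.Int.mod a p))).items
      = (PySem.Set.ofList (L1 p elements)).map
          (fun k => (k, ((L1 p elements).count k : Int))) := by
    rw [PySem.Dict.items_counter]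
    rfl
  have hmem1 : ∀ k, k ∈ PySem.Set.ofList (L1 p elements) ↔ k ∈ L1 p elements :=
    PySem.Set.mem_ofList _
  have hnd1 : (PySem.Set.ofList (L1 p elements)).Nodup := PySem.Set.nodup_ofList _
  -- flatten the conv2 loop
  have e2 : (PySem.Dict.counter (elements.map (fun a => PySem.Int.mod a p))).items.foldl
      (fun d x =>
        (PySem.Dict.counter (elements.map (fun a => PySem.Int.mod a p))).items.foldl
          (fun d y => d.modify (PySem.Int.mod (x.1 + y.1) p) 0 (fun v => v + x.2 * y.2)) d)
      PySem.Dict.empty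
      = wf (fun q : (Int × Int) × (Int × Int) => PySem.Int.mod (q.1.1 + q.2.1) p)
          (fun q => q.1.2 * q.2.2) PySem.Dict.empty
          ((PySem.Dict.counter (elements.map (fun a => PySem.Int.mod a p))).items.flatMap
            (fun x => (PySem.Dict.counter
                (elements.map (fun a => PySem.Int.mod a p))).items.map (fun y => (x, y)))) := by
    simp [wf, List.foldl_flatMap, List.foldl_map]
  rw [e2]
  set conv2 := wf (fun q : (Int × Int) × (Int × Int) => PySem.Int.mod (q.1.1 + q.2.1) p)
      (fun q => q.1.2 * q.2.2) PySem.Dict.empty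
      ((PySem.Dict.counter (elements.map (fun a => PySem.Int.mod a p))).items.flatMap
        (fun x => (PySem.Dict.counter
            (elements.map (fun a => PySem.Int.mod a p))).items.map (fun y => (x, y))))
      with hconv2
  -- conv2's value table
  have hg2 : ∀ t, conv2.getD t 0 = ((L2 p elements).count t : Int) := by
    intro t
    rw [hconv2]
    exact pair_getD _ _ _ _ (L1 p elements) (L1 p elements)
      (fun u v => PySem.Int.mod (u + v) p) hhist hnd1 hmem1 hhist hnd1 hmem1 t
  have hk2mem : ∀ k, k ∈ conv2.keys ↔ k ∈ L2 p elements := by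
    intro k
    rw [hconv2]
    exact pair_keys_mem _ _ _ _ (L1 p elements) (L1 p elements)
      (fun u v => PySem.Int.mod (u + v) p) hhist hmem1 hhist hmem1 k
  have hk2nd : conv2.keys.Nodup := by
    rw [hconv2, wf_keys]; exact PySem.Set.nodup_ofList _
  have hitems2 : conv2.items = conv2.keys.map (fun k => (k, ((L2 p elements).count k : Int))) := by
    rw [PySem.Dict.items_eq_map_keys conv2 hk2nd 0]
    exact List.map_congr_left fun k _ => by rw [hg2 k]
  -- flatten the conv3 loop
  have e3 : conv2.items.foldl
      (fun d t =>
        (PySem.Dict.counter (elements.map (fun a => PySem.Int.mod a p))).items.foldl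
          (fun d r => d.modify (PySem.Int.mod (t.1 + r.1) p) 0 (fun v => v + t.2 * r.2)) d)
      PySem.Dict.empty
      = wf (fun q : (Int × Int) × (Int × Int) => PySem.Int.mod (q.1.1 + q.2.1) p)
          (fun q => q.1.2 * q.2.2) PySem.Dict.empty
          (conv2.items.flatMap
            (fun x => (PySem.Dict.counter
                (elements.map (fun a => PySem.Int.mod a p))).items.map (fun y => (x, y)))) := by
    simp [wf, List.foldl_flatMap, List.foldl_map]
  rw [e3]
  refine result_sum _ _ ?_ ?_ ?_
  · rw [wf_keys]; exact PySem.Set.nodup_ofList _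
  · intro k
    exact pair_keys_mem _ _ _ _ (L2 p elements) (L1 p elements)
      (fun u v => PySem.Int.mod (u + v) p) hitems2 hk2mem hhist hmem1 k
  · intro k
    exact pair_getD _ _ _ _ (L2 p elements) (L1 p elements)
      (fun u v => PySem.Int.mod (u + v) p) hitems2 hk2nd hk2mem hhist hnd1 hmem1 k

-- with p ≠ 0 the two traversals produce the SAME list of residues
theorem L3_eq_TLm (p : Int) (elements : List Int) (hp : p ≠ 0) :
    L3 p elements = TLm p elements := by
  simp only [L3, L2, L1, TLm, TL, List.map_flatMap, List.flatMap_assoc, List.flatMap_map,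
    List.map_map]
  have hfm : ∀ (l : List Int) (f g : Int → List Int), (∀ a ∈ l, f a = g a) →
      l.flatMap f = l.flatMap g := by
    intro l f g h
    simp only [List.flatMap_def]
    exact congrArg _ (List.map_congr_left h)
  refine hfm _ _ _ fun a _ => hfm _ _ _ fun b _ => List.map_congr_left fun c _ => ?_
  exact mod_collapse p a b c hp

theorem compute_N3_moment_spec : Claim_equal_compute_N3_moment := by
  intro p m elements _ hpre
  unfold Spec_compute_N3_moment
  rcases hpre with hp | he
  · rw [A_eq, B_eq, L3_eq_TLm p elements hp]
  · subst he
    rfl
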